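-- pv_equiv track=rewrite | github.com/CupCupRay/Bin2Summary | src/seq2seq/deepbindiff_train.py | generate_reference
-- ===== SOURCE A (Python) =====
-- def generate_reference(comment_sentence, syn):
--     reference_batch = [comment_sentence]
--     for s in syn:
--         temp_words = []
--         Flag = False
--         for word in comment_sentence:
--             if s == word:
--                 temp_words.append(syn[s])
--                 Flag = True
--             else:
--                 temp_words.append(word)
--         if Flag: reference_batch.append(temp_words)
--     return reference_batch
-- ===== SOURCE B (Python) =====
-- def generate_reference(comment_sentence, syn):
--     positions = {}
--     for i, word in enumerate(comment_sentence):
--         positions.setdefault(word, []).append(i)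
--     reference_batch = [comment_sentence]
--     for s in syn:
--         if s in positions:
--             sentence = list(comment_sentence)
--             for i in positions[s]:
--                 sentence[i] = syn[s]
--             reference_batch.append(sentence)
--     return reference_batch
-- ===== Notes on version B (the rewrite author's own statement) =====
-- stated objective: faster
-- what changed: Instead of rescanning and rebuilding the whole sentence word-by-word for every synonym key, B precomputes a word->positions index of the sentence once, then for each key present in the index copies the sentence and overwrites only the stored positions; absent keys cost O(1) instead of a full O(n) scan.
import Mathlib
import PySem

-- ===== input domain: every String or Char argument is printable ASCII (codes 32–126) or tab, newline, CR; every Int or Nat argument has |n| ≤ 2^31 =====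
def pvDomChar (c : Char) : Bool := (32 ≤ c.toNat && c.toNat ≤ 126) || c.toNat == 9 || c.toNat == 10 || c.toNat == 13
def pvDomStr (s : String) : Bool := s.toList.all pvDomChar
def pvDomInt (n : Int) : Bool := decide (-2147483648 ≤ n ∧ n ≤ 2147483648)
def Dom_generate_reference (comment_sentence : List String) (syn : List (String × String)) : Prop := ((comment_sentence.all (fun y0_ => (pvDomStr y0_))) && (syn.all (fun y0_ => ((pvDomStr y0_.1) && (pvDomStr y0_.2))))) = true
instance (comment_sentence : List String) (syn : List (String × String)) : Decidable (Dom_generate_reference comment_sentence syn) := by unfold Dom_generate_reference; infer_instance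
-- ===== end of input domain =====

-- B replaces A's per-key rescan/rebuild of the sentence by a word→positions index built once,
-- then copies the sentence and overwrites the stored positions for each present key (objective: faster; measured).

-- ===== PORT A =====
-- 'for s in syn' over a dict iterates the keys; 'syn[s]' is the value of the current key.
def generate_reference (comment_sentence : List String) (syn : List (String × String)) : List (List String) :=
  syn.foldl (fun reference_batch kv =>
    let r := comment_sentence.foldl
      (fun (st : List String × Bool) word =>
        if kv.1 = word then (st.1 ++ [kv.2], true) else (st.1 ++ [word], st.2))
      ([], false)
    if r.2 then reference_batch ++ [r.1] else reference_batch)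
  [comment_sentence]

-- ===== PORT B =====
-- positions.setdefault(word, []).append(i)  =  Dict.modify word [] (· ++ [i])
def generate_reference_alt (comment_sentence : List String) (syn : List (String × String)) : List (List String) :=
  let positions : PySem.Dict String (List Int) :=
    (PySem.List.enumerate comment_sentence).foldl
      (fun d p => d.modify p.2 [] (· ++ [p.1])) PySem.Dict.empty
  syn.foldl (fun reference_batch kv =>
    if positions.contains kv.1 then
      reference_batch ++
        [(positions.getD kv.1 []).foldl (fun c i => PySem.List.pySetD c i kv.2) comment_sentence]
    else reference_batch)
  [comment_sentence]

-- ===== PRECONDITION & SPEC =====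
def Spec_generate_reference (comment_sentence : List String) (syn : List (String × String)) (out : List (List String)) : Prop := out = generate_reference_alt comment_sentence syn
instance (comment_sentence : List String) (syn : List (String × String)) (out : List (List String)) : Decidable (Spec_generate_reference comment_sentence syn out) := by unfold Spec_generate_reference; infer_instance

-- ===== CLAIM (what is proved, stated in full; the proofs are below) =====
def Claim_equal_generate_reference : Prop := ∀ (comment_sentence : List String) (syn : List (String × String)), Dom_generate_reference comment_sentence syn → Spec_generate_reference comment_sentence syn (generate_reference comment_sentence syn)

-- ===== LEMMAS AND PROOFS =====

-- A's inner word loop builds the substituted sentence and the 'hit' flag.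
theorem innerA_eq (cs : List String) (k v : String) (acc : List String) (fl : Bool) :
    cs.foldl (fun (st : List String × Bool) word =>
        if k = word then (st.1 ++ [v], true) else (st.1 ++ [word], st.2)) (acc, fl)
      = (acc ++ cs.map (fun w => if k = w then v else w), fl || cs.any (fun w => k = w)) := by
  induction cs generalizing acc fl with
  | nil => simp
  | cons x xs ih =>
    by_cases h : k = x
    · subst h; simp [ih, List.append_assoc]
    · simp [h, ih]

-- B's positions dict: lookup returns exactly the stored indices of k in cs.
theorem positions_getD (cs : List String) (k : String) :
    ((PySem.List.enumerate cs).foldl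
        (fun (d : PySem.Dict String (List Int)) p => d.modify p.2 [] (· ++ [p.1]))
        PySem.Dict.empty).getD k []
      = (((PySem.List.enumerate cs).filter (fun p => p.2 == k)).map (·.1)) := by
  have h : (PySem.List.enumerate cs).foldl
        (fun (d : PySem.Dict String (List Int)) p => d.modify p.2 [] (· ++ [p.1]))
        PySem.Dict.empty
      = ((PySem.List.enumerate cs).map (fun p => (p.2, p.1))).foldl
        (fun (d : PySem.Dict String (List Int)) q => d.modify q.1 [] (· ++ [q.2]))
        PySem.Dict.empty := by
    rw [List.foldl_map]
  rw [h, PySem.Dict.getD_foldl_modify_append]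
  simp [List.filter_map, List.map_map, Function.comp_def]

theorem positions_contains (cs : List String) (k : String) :
    ((PySem.List.enumerate cs).foldl
        (fun (d : PySem.Dict String (List Int)) p => d.modify p.2 [] (· ++ [p.1]))
        PySem.Dict.empty).contains k
      = cs.any (fun w => k = w) := by
  have h : ((PySem.List.enumerate cs).foldl
        (fun (d : PySem.Dict String (List Int)) p => d.modify p.2 [] (· ++ [p.1]))
        PySem.Dict.empty).contains k = true ↔ k ∈ cs := by
    rw [PySem.Dict.contains_iff_mem_keys]
    rw [show (fun (d : PySem.Dict String (List Int)) p => d.modify p.2 [] (· ++ [p.1]))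
          = (fun (d : PySem.Dict String (List Int)) (p : Int × String) =>
              d.modify ((·.2) p) [] (· ++ [p.1])) from rfl]
    rw [PySem.Dict.keys_foldl_modify_key]
    simp [PySem.List.map_snd_enumerate, PySem.Set.update_nil_left, PySem.Set.mem_ofList]
  by_cases hk : k ∈ cs
  · rw [h.mpr hk]
    symm; rw [List.any_eq_true]
    exact ⟨k, hk, by simp⟩
  · have h1 : ¬ _ = true := fun hc => hk (h.mp hc)
    rw [Bool.not_eq_true] at h1
    rw [h1]; symm; rw [Bool.eq_false_iff]
    intro hc
    rw [List.any_eq_true] at hc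
    obtain ⟨w, hw, he⟩ := hc
    exact hk (by simpa using (show k = w by simpa using he) ▸ hw)
-- membership of an index in the filtered-enumerate position list
theorem mem_positions_iff (cs : List String) (k : String) (j : Nat) (hj : j < cs.length) :
    ((j : Int) ∈ ((PySem.List.enumerate cs).filter (fun p => p.2 == k)).map (·.1))
      ↔ cs[j] = k := by
  constructor
  · rintro hm
    simp only [List.mem_map, List.mem_filter] at hm
    obtain ⟨p, ⟨hpmem, hpk⟩, hpj⟩ := hm
    rw [PySem.List.mem_enumerate_iff] at hpmem
    obtain ⟨m, hm', rfl⟩ := hpmem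
    simp only [beq_iff_eq] at hpk
    have : m = j := by simpa using hpj
    subst this; exact hpk
  · intro hk
    refine List.mem_map.mpr ⟨((j : Int), cs[j]), List.mem_filter.mpr ⟨?_, by simp [hk]⟩, rfl⟩
    rw [PySem.List.mem_enumerate_iff]
    exact ⟨j, hj, by simp⟩

-- overwriting a set of valid nonnegative indices, described pointwise
theorem foldl_pySetD_getElem? (l : List Int) (v : String) :
    ∀ (ys : List String), (∀ i ∈ l, ∃ m : Nat, i = (m : Int) ∧ m < ys.length) →
    ∀ j : Nat, j < ys.length →
      (l.foldl (fun c i => PySem.List.pySetD c i v) ys)[j]? =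
        (if (j : Int) ∈ l then some v else ys[j]?) := by
  induction l with
  | nil => intro ys _ j hj; simp
  | cons i is ih =>
    intro ys hc j hj
    obtain ⟨m, rfl, hm⟩ := hc i (List.mem_cons_self ..)
    have hlen : (PySem.List.pySetD ys (m : Int) v).length = ys.length := by
      simp [PySem.List.pySetD_natCast]
    have hrest : ∀ i ∈ is, ∃ m' : Nat, i = (m' : Int) ∧ m' < (PySem.List.pySetD ys (m : Int) v).length := by
      intro i hi
      obtain ⟨m', rfl, hm'⟩ := hc i (List.mem_cons_of_mem _ hi)
      exact ⟨m', rfl, by omega⟩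
    rw [List.foldl_cons, ih _ hrest j (by omega)]
    by_cases hmem : (j : Int) ∈ is
    · simp [hmem]
    · by_cases hjm : j = m
      · subst hjm
        simp [hmem, PySem.List.pySetD_natCast, hm]
      · have hne : ¬ ((j : Int) = (m : Int)) := by exact_mod_cast hjm
        have hjm' : ¬ m = j := fun h => hjm h.symm
        simp [hmem, hne, hjm', PySem.List.pySetD_natCast]

theorem foldl_pySetD_length (l : List Int) (v : String) :
    ∀ c : List String, (l.foldl (fun c i => PySem.List.pySetD c i v) c).length = c.length := by
  induction l with
  | nil => intro c; simp
  | cons i is ih => intro c; rw [List.foldl_cons, ih]; simp [PySem.List.length_pySetD]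

-- the position-overwrite pass equals A's map-substitution
theorem foldl_pySetD_eq_map (cs : List String) (k v : String) :
    (((PySem.List.enumerate cs).filter (fun p => p.2 == k)).map (·.1)).foldl
        (fun c i => PySem.List.pySetD c i v) cs
      = cs.map (fun w => if k = w then v else w) := by
  set l := ((PySem.List.enumerate cs).filter (fun p => p.2 == k)).map (·.1) with hl
  have hvalid : ∀ i ∈ l, ∃ m : Nat, i = (m : Int) ∧ m < cs.length := by
    intro i hi
    simp only [hl, List.mem_map, List.mem_filter] at hi
    obtain ⟨p, ⟨hpmem, _⟩, hpj⟩ := hi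
    rw [PySem.List.mem_enumerate_iff] at hpmem
    obtain ⟨m, hm', rfl⟩ := hpmem
    exact ⟨m, by simpa using hpj.symm, hm'⟩
  apply List.ext_getElem?
  intro j
  by_cases hj : j < cs.length
  · rw [foldl_pySetD_getElem? l v cs hvalid j hj]
    have hmem := mem_positions_iff cs k j hj
    rw [← hl] at hmem
    by_cases hk : cs[j] = k
    · rw [if_pos (hmem.mpr hk)]
      have hke : k = cs[j] := hk.symm
      simp [List.getElem?_map, List.getElem?_eq_getElem hj, ← hke]
    · rw [if_neg (fun h => hk (hmem.mp h))]
      have hkne : ¬ (k = cs[j]) := fun h => hk h.symm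
      simp [List.getElem?_map, List.getElem?_eq_getElem hj, hkne]
  · have h1 : (l.foldl (fun c i => PySem.List.pySetD c i v) cs)[j]? = none := by
      rw [List.getElem?_eq_none_iff, foldl_pySetD_length]; omega
    have h2 : (cs.map (fun w => if k = w then v else w))[j]? = none := by
      rw [List.getElem?_eq_none_iff]; simp; omega
    rw [h1, h2]

-- ===== VERDICT (by name: the statement is the Claim_ definition above) =====
theorem generate_reference_spec : Claim_equal_generate_reference := by
  intro cs syn _
  unfold Spec_generate_reference generate_reference generate_reference_alt
  congr 1
  funext acc kv
  rw [innerA_eq cs kv.1 kv.2 [] false]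
  simp only [List.nil_append, Bool.false_or]
  rw [positions_contains cs kv.1, positions_getD cs kv.1, foldl_pySetD_eq_map cs kv.1 kv.2]
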